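-- pv_equiv track=rewrite | github.com/Fabio930/CollectiPy | src/utils/folder_utils.py | _alphanumeric_index
-- ===== SOURCE A (Python) =====
-- def _alphanumeric_index(index: int) -> str:
--     """Convert an integer into an alphanumeric suffix (a, b, ..., z, 0, 1, ...)."""
--     if index <= 0:
--         return ""
--     digits = "abcdefghijklmnopqrstuvwxyz0123456789"
--     base = len(digits)
--     result = []
--     value = index
--     while value > 0:
--         value -= 1
--         result.append(digits[value % base])
--         value //= base
--     return "".join(reversed(result))
-- ===== SOURCE B (Python) =====
-- def _alphanumeric_index(index: int) -> str:
--     """Convert an integer into an alphanumeric suffix (a, b, ..., z, 0, 1, ...)."""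
--     if index <= 0:
--         return ""
--     digits = "abcdefghijklmnopqrstuvwxyz0123456789"
--     # Stage 1: find the length L of the suffix and the count of all shorter suffixes.
--     L, shorter, block = 1, 0, 36
--     while shorter + block < index:
--         shorter += block
--         block *= 36
--         L += 1
--     # Stage 2: rank within the length-L suffixes, emitted most-significant digit first.
--     m = index - shorter - 1
--     out = []
--     for i in range(L - 1, -1, -1):
--         out.append(digits[(m // 36 ** i) % 36])
--     return "".join(out)
-- ===== Notes on version B (the rewrite author's own statement) =====
-- stated objective: alternative
-- what changed: Replaced the single append-then-reverse division loop by a two-stage algorithm: first a loop computing the suffix length and the count of all shorter suffixes, then a left-to-right pass emitting each digit directly from the rank via powers of the alphabet size, with no list accumulator and no reversal.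
import Mathlib
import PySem

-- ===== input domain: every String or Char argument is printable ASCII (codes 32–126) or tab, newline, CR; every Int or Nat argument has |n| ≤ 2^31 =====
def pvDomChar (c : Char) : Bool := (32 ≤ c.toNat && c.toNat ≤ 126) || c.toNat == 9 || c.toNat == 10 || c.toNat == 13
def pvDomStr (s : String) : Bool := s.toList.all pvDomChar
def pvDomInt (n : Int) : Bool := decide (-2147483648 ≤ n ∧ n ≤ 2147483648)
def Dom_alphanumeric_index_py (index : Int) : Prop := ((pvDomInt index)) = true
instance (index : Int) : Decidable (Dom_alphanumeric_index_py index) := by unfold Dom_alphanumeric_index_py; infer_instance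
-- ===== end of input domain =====

-- B replaces A's append-then-reverse division loop by a two-stage algorithm (length first,
-- then digits emitted most-significant first via powers of 36); same cost, different structure.

-- ===== PORT A =====
def pvDigits : List Char := "abcdefghijklmnopqrstuvwxyz0123456789".toList

theorem pvFloordiv36_lt (v : Int) (h : 0 < v) :
    (PySem.Int.floordiv (v - 1) 36).toNat < v.toNat := by
  rw [PySem.Int.floordiv_eq_ediv_of_pos (by norm_num)]
  have h1 : (v - 1) / 36 ≤ v - 1 := Int.ediv_le_self _ (by omega)
  have h2 : 0 ≤ (v - 1) / 36 := Int.ediv_nonneg (by omega) (by norm_num)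
  omega

-- while value > 0: value -= 1; result.append(digits[value % base]); value //= base
def pvLoopA (value : Int) (result : List Char) : List Char :=
  if value > 0 then
    pvLoopA (PySem.Int.floordiv (value - 1) 36)
      (result ++ [PySem.List.pyGetD pvDigits (PySem.Int.mod (value - 1) 36) ' '])
  else result
termination_by value.toNat
decreasing_by exact pvFloordiv36_lt value (by omega)

def alphanumeric_index_py (index : Int) : String :=
  if index ≤ 0 then "" else String.ofList (pvLoopA index []).reverse

-- ===== PORT B =====
-- stage 1: while shorter + block < index: shorter += block; block *= 36; L += 1
-- ('0 < block' in the guard is a pure totality guard: block starts at 36 and only grows)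
def pvLenLoop (index shorter block : Int) (L : Nat) : Nat × Int :=
  if shorter + block < index ∧ 0 < block then
    pvLenLoop index (shorter + block) (block * 36) (L + 1)
  else (L, shorter)
termination_by (index - shorter).toNat
decreasing_by omega

-- stage 2: for i in range(L-1, -1, -1): out.append(digits[(m // 36 ** i) % 36])
-- (the downward-counting append loop, transcribed as recursion on i; head = highest power)
def pvMsd (m : Int) : Nat → List Char
  | 0 => []
  | Nat.succ i =>
      PySem.List.pyGetD pvDigits (PySem.Int.mod (PySem.Int.floordiv m ((36 : Int) ^ i)) 36) ' '
        :: pvMsd m i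

def alphanumeric_index_py_alt (index : Int) : String :=
  if index ≤ 0 then ""
  else
    let p := pvLenLoop index 0 36 1
    String.ofList (pvMsd (index - p.2 - 1) p.1)

-- ===== PRECONDITION & SPEC =====
def Spec_alphanumeric_index_py (index : Int) (out : String) : Prop := out = alphanumeric_index_py_alt index
instance (index : Int) (out : String) : Decidable (Spec_alphanumeric_index_py index out) := by unfold Spec_alphanumeric_index_py; infer_instance

-- ===== CLAIM =====
def Claim_equal_alphanumeric_index_py : Prop := ∀ (index : Int), Dom_alphanumeric_index_py index → Spec_alphanumeric_index_py index (alphanumeric_index_py index)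

-- ===== LEMMAS AND PROOFS =====

-- reference recursion: the common recurrence both programs realise
def pvRec (index : Int) : List Char :=
  if index ≤ 0 then []
  else
    pvRec (PySem.Int.floordiv (index - 1) 36) ++
      [PySem.List.pyGetD pvDigits (PySem.Int.mod (index - 1) 36) ' ']
termination_by index.toNat
decreasing_by exact pvFloordiv36_lt index (by omega)

theorem pvLoop_eq_aux (n : Nat) : ∀ (v : Int), v.toNat ≤ n → ∀ (res : List Char),
    pvLoopA v res = res ++ (pvRec v).reverse := by
  induction n with
  | zero =>
    intro v hv res
    have h0 : ¬ v > 0 := by omega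
    rw [pvLoopA, pvRec]
    simp [h0, show v ≤ 0 by omega]
  | succ m ih =>
    intro v hv res
    by_cases h : v > 0
    · have hlt := pvFloordiv36_lt v h
      rw [pvLoopA, pvRec]
      simp only [h, show ¬ v ≤ 0 by omega, if_true, if_neg, not_false_iff]
      rw [ih _ (by omega)]
      simp
    · rw [pvLoopA, pvRec]
      simp [h, show v ≤ 0 by omega]

-- u L = number of suffixes of length < L, with u 0 = -1 so that pvRec (u 0 + 0 + 1) = []
def pvU : Nat → Int
  | 0 => -1
  | Nat.succ L => 36 * pvU L + 36

theorem pvU_succ (L : Nat) : pvU (L + 1) = pvU L + 36 ^ L := by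
  induction L with
  | zero => decide
  | succ k ih =>
    have h1 : pvU (k + 1 + 1) = 36 * pvU (k + 1) + 36 := rfl
    have h2 : pvU (k + 1) = 36 * pvU k + 36 := rfl
    have hp : (36 : Int) ^ (k + 1) = 36 ^ k * 36 := pow_succ 36 k
    omega

theorem pvU_nonneg (L : Nat) (h : 1 ≤ L) : 0 ≤ pvU L := by
  induction L with
  | zero => omega
  | succ k ih =>
    have h1 : pvU (k + 1) = 36 * pvU k + 36 := rfl
    rcases Nat.eq_zero_or_pos k with hk | hk
    · subst hk; decide
    · have := ih hk; omega

-- stage-2 loop peels its LAST digit like pvRec does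
theorem pvMsd_last (L : Nat) : ∀ (m : Int), 0 ≤ m →
    pvMsd m (L + 1) =
      pvMsd (PySem.Int.floordiv m 36) L ++
        [PySem.List.pyGetD pvDigits (PySem.Int.mod m 36) ' '] := by
  induction L with
  | zero =>
    intro m hm
    show [PySem.List.pyGetD pvDigits (PySem.Int.mod (PySem.Int.floordiv m ((36:Int) ^ 0)) 36) ' ']
      = [] ++ [PySem.List.pyGetD pvDigits (PySem.Int.mod m 36) ' ']
    rw [pow_zero, PySem.Int.floordiv_eq_ediv_of_pos (by norm_num), Int.ediv_one,
        List.nil_append]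
  | succ k ih =>
    intro m hm
    have hdiv : PySem.Int.floordiv m ((36 : Int) ^ (k + 1))
        = PySem.Int.floordiv (PySem.Int.floordiv m 36) ((36 : Int) ^ k) := by
      rw [PySem.Int.floordiv_eq_ediv_of_pos (by positivity),
          PySem.Int.floordiv_eq_ediv_of_pos (by norm_num),
          PySem.Int.floordiv_eq_ediv_of_pos (by positivity),
          pow_succ']
      exact (Int.ediv_ediv_of_nonneg (by norm_num : (0:Int) ≤ 36)).symm
    rw [pvMsd, ih m hm, hdiv]
    rw [show pvMsd (PySem.Int.floordiv m 36) (k + 1) =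
        PySem.List.pyGetD pvDigits
          (PySem.Int.mod (PySem.Int.floordiv (PySem.Int.floordiv m 36) ((36:Int) ^ k)) 36) ' '
          :: pvMsd (PySem.Int.floordiv m 36) k from rfl]
    simp

theorem pvMsd_eq_rec (L : Nat) : ∀ (m : Int), 0 ≤ m → m < 36 ^ L →
    pvMsd m L = pvRec (pvU L + m + 1) := by
  induction L with
  | zero =>
    intro m h0 h1
    have : m = 0 := by omega
    rw [pvRec]
    simp [this, pvMsd, pvU]
  | succ k ih =>
    intro m h0 h1
    have hidx : 0 < pvU (k + 1) + m + 1 := by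
      have := pvU_nonneg (k + 1) (by omega); omega
    rw [pvMsd_last k m h0, pvRec]
    rw [if_neg (by omega)]
    have hU : pvU (k + 1) = 36 * pvU k + 36 := rfl
    have hq : PySem.Int.floordiv (pvU (k + 1) + m + 1 - 1) 36
        = pvU k + PySem.Int.floordiv m 36 + 1 := by
      rw [PySem.Int.floordiv_eq_ediv_of_pos (by norm_num),
          PySem.Int.floordiv_eq_ediv_of_pos (by norm_num)]
      omega
    have hr : PySem.Int.mod (pvU (k + 1) + m + 1 - 1) 36 = PySem.Int.mod m 36 := by
      rw [PySem.Int.mod_eq_emod_of_pos (by norm_num),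
          PySem.Int.mod_eq_emod_of_pos (by norm_num)]
      omega
    rw [hq, hr]
    congr 1
    have hdivlt : PySem.Int.floordiv m 36 < 36 ^ k := by
      rw [PySem.Int.floordiv_eq_ediv_of_pos (by norm_num)]
      rw [Int.ediv_lt_iff_lt_mul (by norm_num)]
      calc m < 36 ^ (k + 1) := h1
        _ = 36 ^ k * 36 := by rw [pow_succ]
    have hdiv0 : 0 ≤ PySem.Int.floordiv m 36 := by
      rw [PySem.Int.floordiv_eq_ediv_of_pos (by norm_num)]
      exact Int.ediv_nonneg h0 (by norm_num)
    exact ih _ hdiv0 hdivlt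

theorem pvLenLoop_spec_aux (n : Nat) : ∀ (L : Nat) (index : Int), 1 ≤ L →
    pvU L < index → (index - pvU L).toNat ≤ n →
    ∃ L', pvLenLoop index (pvU L) ((36 : Int) ^ L) L = (L', pvU L') ∧
      pvU L' < index ∧ index ≤ pvU (L' + 1) := by
  induction n with
  | zero =>
    intro L index hL hlt hn
    omega
  | succ m ih =>
    intro L index hL hlt hn
    rw [pvLenLoop]
    by_cases h : pvU L + 36 ^ L < index ∧ 0 < (36 : Int) ^ L
    · rw [if_pos h]
      have h1 : pvU L + 36 ^ L = pvU (L + 1) := (pvU_succ L).symm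
      have h2 : (36 : Int) ^ L * 36 = 36 ^ (L + 1) := (pow_succ 36 L).symm
      rw [h1, h2]
      have hpos := pvU_nonneg L hL
      have hone : (1 : Int) ≤ 36 ^ L := h.2
      exact ih (L + 1) index (by omega) (by omega) (by omega)
    · rw [if_neg h]
      have hp : (0 : Int) < 36 ^ L := by positivity
      exact ⟨L, rfl, hlt, by rw [pvU_succ]; omega⟩

-- ===== VERDICT =====
theorem alphanumeric_index_py_spec : Claim_equal_alphanumeric_index_py := by
  intro index _
  unfold Spec_alphanumeric_index_py alphanumeric_index_py alphanumeric_index_py_alt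
  by_cases h : index ≤ 0
  · simp [h]
  · simp only [h, if_neg, not_false_iff]
    rw [pvLoop_eq_aux index.toNat index le_rfl []]
    simp only [List.nil_append, List.reverse_reverse]
    have h1 : pvU 1 = 0 := by simp [pvU]
    obtain ⟨L', hloop, hlt, hle⟩ :=
      pvLenLoop_spec_aux (index - pvU 1).toNat 1 index le_rfl (by omega) le_rfl
    have : pvLenLoop index 0 36 1 = (L', pvU L') := by
      rw [← hloop, h1]; norm_num
    rw [this]
    simp only
    have hm0 : 0 ≤ index - pvU L' - 1 := by omega
    have hs := pvU_succ L'
    have hm1 : index - pvU L' - 1 < 36 ^ L' := by omega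
    rw [pvMsd_eq_rec L' _ hm0 hm1]
    congr 2
    omega
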